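-- pv_equiv track=rewrite | github.com/ryotaro612/lc | src/lc_curated_algo170/find_good_days_to_rob_the_bank.py | find_non_inc
-- ===== SOURCE A (Python) =====
-- def find_non_inc(security, time):
--     n = len(security)
--     stack = []
--     # stack[i] >= stack[i+1]
--     result = set()
--     for i in range(n):
--         if stack:
--             if stack[-1] >= security[i]:
--                 stack.append(security[i])
--             else:
--                 stack = [security[i]]
--         else:
--             stack.append(security[i])
--
--         if len(stack) > time:
--             result.add(i)
--     return result
-- ===== SOURCE B (Python) =====
-- def find_non_inc(security, time):
--     # Segment-based: find each maximal non-increasing run [L..R] and add the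
--     # whole block of qualifying indices range(max(L, L+time), R+1) at once.
--     n = len(security)
--     res = []
--     L = 0
--     prev = None
--     for R, x in enumerate(security):
--         if prev is not None and x > prev:
--             res.extend(range(max(L, L + time), R))
--             L = R
--         prev = x
--     if n:
--         res.extend(range(max(L, L + time), n))
--     return set(res)
-- ===== Notes on version B (the rewrite author's own statement) =====
-- stated objective: alternative
-- what changed: Instead of maintaining an explicit stack and testing its length at every index, B scans once for the boundaries of maximal non-increasing runs and appends the whole block of qualifying indices range(max(L,L+time), R+1) per run.
import Mathlib
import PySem

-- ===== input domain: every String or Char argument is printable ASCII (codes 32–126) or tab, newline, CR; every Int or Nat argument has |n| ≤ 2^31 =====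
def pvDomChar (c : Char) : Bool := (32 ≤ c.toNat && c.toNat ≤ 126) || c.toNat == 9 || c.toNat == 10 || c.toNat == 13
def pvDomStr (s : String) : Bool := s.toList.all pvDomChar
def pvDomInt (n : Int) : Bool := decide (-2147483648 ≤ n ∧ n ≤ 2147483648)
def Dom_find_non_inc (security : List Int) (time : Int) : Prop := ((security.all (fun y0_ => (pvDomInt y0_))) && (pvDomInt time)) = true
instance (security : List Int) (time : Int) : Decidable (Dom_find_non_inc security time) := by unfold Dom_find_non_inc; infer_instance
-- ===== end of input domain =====

-- B replaces A's per-index stack-length test with a boundary-finding pass over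
-- maximal non-increasing runs plus one block range-insertion per run (alternative decomposition, same cost).


-- ===== PORT A =====
-- literal transliteration of A's loop: 'for i in range(n)' becomes structural
-- recursion over the list carrying the index i; stack[-1] is pyGetD stack (-1) 0.
def findA_go (time : Int) : List Int → Int → List Int → List Int → List Int
  | [], _i, _stack, result => result
  | x :: rest, i, stack, result =>
    let stack' := if stack ≠ [] then
        (if PySem.List.pyGetD stack (-1) 0 ≥ x then stack ++ [x] else [x])
      else stack ++ [x]
    let result' := if time < (stack'.length : Int) then PySem.Set.add result i else result
    findA_go time rest (i + 1) stack' result'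

def find_non_inc (security : List Int) (time : Int) : List Int :=
  findA_go time security 0 [] PySem.Set.empty

-- ===== PORT B =====
-- res.extend(range(max(L, L+time), R))
def findB_block (L R time : Int) : List Int := PySem.List.pyRange (max L (L + time)) R 1

-- the for-loop of Source B: recursion over the list carrying prev, L and the index R
def findB_go (time : Int) : List Int → Int → Int → Int → List Int → List Int
  | [], _prev, L, R, res => res ++ findB_block L R time        -- final extend (n = R here)
  | x :: rest, prev, L, R, res =>
    if x > prev then findB_go time rest x R (R + 1) (res ++ findB_block L R time)
    else findB_go time rest x L (R + 1) res

def find_non_inc_alt (security : List Int) (time : Int) : List Int :=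
  match security with
  | [] => []                                                   -- empty list: no extend, set([]) = ∅
  | x :: rest => PySem.Set.ofList (findB_go time rest x 0 1 [])

-- ===== PRECONDITION & SPEC =====
def Spec_find_non_inc (security : List Int) (time : Int) (out : List Int) : Prop := out = find_non_inc_alt security time
instance (security : List Int) (time : Int) (out : List Int) : Decidable (Spec_find_non_inc security time out) := by unfold Spec_find_non_inc; infer_instance

-- ===== CLAIM (what is proved, stated in full; the proofs are below) =====
def Claim_equal_find_non_inc : Prop := ∀ (security : List Int) (time : Int), Dom_find_non_inc security time → Spec_find_non_inc security time (find_non_inc security time)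

-- ===== LEMMAS AND PROOFS =====

lemma findB_block_succ (L R time : Int) (hLR : L ≤ R) :
    findB_block L (R + 1) time =
      findB_block L R time ++ (if time < R - L + 1 then [R] else []) := by
  unfold findB_block
  by_cases h : time < R - L + 1
  · have hm : max L (L + time) ≤ R := by
      rcases max_cases L (L + time) with ⟨he, _⟩ | ⟨he, _⟩ <;> omega
    rw [PySem.List.pyRange_one_succ_right hm, if_pos h]
  · have hm : R + 1 ≤ max L (L + time) := by
      rcases max_cases L (L + time) with ⟨he, hc⟩ | ⟨he, _⟩ <;> omega
    rw [PySem.List.pyRange_one_eq_nil hm, PySem.List.pyRange_one_eq_nil (by omega), if_neg h]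
    simp

lemma mem_findB_block {y L R time : Int} (hy : y ∈ findB_block L R time) :
    L ≤ y ∧ y < R := by
  unfold findB_block at hy
  rw [PySem.List.mem_pyRange_one] at hy
  rcases max_cases L (L + time) with ⟨he, _⟩ | ⟨he, _⟩ <;> omega

lemma set_add_append {res : List Int} {R : Int} (h : ∀ y ∈ res, y < R) :
    PySem.Set.add res R = res ++ [R] := by
  unfold PySem.Set.add
  rw [if_neg]
  simp only [PySem.Set.contains_eq_listContains, List.contains_eq_mem, decide_eq_true_eq]
  intro hmem
  exact absurd rfl (ne_of_lt (h R hmem))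

-- the main simulation invariant between A's stack loop and B's boundary loop
lemma go_eq (time : Int) : ∀ (rest : List Int) (prev L R : Int) (stack res : List Int),
    stack ≠ [] →
    PySem.List.pyGetD stack (-1) 0 = prev →
    (stack.length : Int) = R - L →
    (∀ y ∈ res, y < L) →
    findA_go time rest R stack (res ++ findB_block L R time) = findB_go time rest prev L R res := by
  intro rest
  induction rest with
  | nil =>
    intro prev L R stack res _ _ _ _
    simp [findA_go, findB_go]
  | cons x rest ih =>
    intro prev L R stack res hne hlast hlen hres
    have hLR : L < R := by
      have : 0 < stack.length := List.length_pos_of_ne_nil hne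
      omega
    have hresR : ∀ y ∈ res ++ findB_block L R time, y < R := by
      intro y hy
      rcases List.mem_append.mp hy with h | h
      · exact lt_trans (hres y h) hLR
      · exact (mem_findB_block h).2
    simp only [findA_go, findB_go, if_pos hne, hlast]
    by_cases hcmp : prev ≥ x
    · -- run continues
      rw [if_pos hcmp, if_neg (by omega : ¬ x > prev)]
      have hlen' : ((stack ++ [x]).length : Int) = (R + 1) - L := by
        simp [List.length_append]; omega
      have hres' : res ++ findB_block L (R + 1) time =
          res ++ findB_block L R time ++ (if time < R - L + 1 then [R] else []) := by
        rw [findB_block_succ L R time (le_of_lt hLR), List.append_assoc]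
      have step : (if time < (((stack ++ [x]).length : Nat) : Int) then
            PySem.Set.add (res ++ findB_block L R time) R else res ++ findB_block L R time)
          = res ++ findB_block L (R + 1) time := by
        rw [hres']
        by_cases ht : time < R - L + 1
        · rw [if_pos (by omega : time < (((stack ++ [x]).length : Nat) : Int)),
            set_add_append hresR, if_pos ht]
        · rw [if_neg (by omega : ¬ time < (((stack ++ [x]).length : Nat) : Int)), if_neg ht]
          simp
      rw [step]
      exact ih x L (R + 1) (stack ++ [x]) res (by simp)
        (PySem.List.pyGetD_neg_one_append_singleton stack x 0) hlen' hres
    · -- run breaks: A resets the stack, B closes the block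
      rw [if_neg hcmp, if_pos (by omega : x > prev)]
      have step : (if time < (([x].length : Nat) : Int) then
            PySem.Set.add (res ++ findB_block L R time) R else res ++ findB_block L R time)
          = (res ++ findB_block L R time) ++ findB_block R (R + 1) time := by
        by_cases ht : time < 1
        · rw [if_pos (by simpa using ht), set_add_append hresR]
          unfold findB_block
          rw [(by omega : max R (R + time) = R), PySem.List.pyRange_one_singleton]
        · rw [if_neg (by simpa using ht)]
          unfold findB_block
          have hz : PySem.List.pyRange (max R (R + time)) (R + 1) 1 = [] :=
            PySem.List.pyRange_one_eq_nil
              (by have hmr : max R (R + time) = R + time := max_eq_right (by omega); omega)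
          rw [hz]
          simp
      rw [step]
      exact ih x R (R + 1) [x] (res ++ findB_block L R time) (by simp)
        (PySem.List.pyGetD_neg_one_append_singleton [] x 0) (by simp) hresR

-- B's accumulated index list is strictly increasing, so set(res) leaves it unchanged
lemma goB_sorted (time : Int) : ∀ (rest : List Int) (prev L R : Int) (res : List Int),
    L < R → (∀ y ∈ res, y < L) → res.Pairwise (· < ·) →
    (findB_go time rest prev L R res).Pairwise (· < ·) := by
  intro rest
  induction rest with
  | nil =>
    intro prev L R res hLR hres hp
    simp only [findB_go]
    rw [List.pairwise_append]
    refine ⟨hp, ?_, ?_⟩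
    · unfold findB_block; exact PySem.List.pairwise_lt_pyRange_one _ _
    · intro y hy z hz
      exact lt_of_lt_of_le (hres y hy) (mem_findB_block hz).1
  | cons x rest ih =>
    intro prev L R res hLR hres hp
    simp only [findB_go]
    by_cases hc : x > prev
    · rw [if_pos hc]
      refine ih x R (R + 1) _ (by omega) ?_ ?_
      · intro y hy
        rcases List.mem_append.mp hy with h | h
        · exact lt_trans (hres y h) hLR
        · exact (mem_findB_block h).2
      · rw [List.pairwise_append]
        refine ⟨hp, ?_, ?_⟩
        · unfold findB_block; exact PySem.List.pairwise_lt_pyRange_one _ _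
        · intro y hy z hz
          exact lt_of_lt_of_le (hres y hy) (mem_findB_block hz).1
    · rw [if_neg hc]
      exact ih x L (R + 1) res (by omega) hres hp

-- ===== VERDICT (by name: the statement is the Claim_ definition above) =====
theorem find_non_inc_spec : Claim_equal_find_non_inc := by
  intro security time _
  unfold Spec_find_non_inc
  match security with
  | [] => rfl
  | x :: rest =>
    show findA_go time (x :: rest) 0 [] PySem.Set.empty =
      PySem.Set.ofList (findB_go time rest x 0 1 [])
    have first : findA_go time (x :: rest) 0 [] PySem.Set.empty =
        findA_go time rest 1 [x] ([] ++ findB_block 0 1 time) := by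
      have hb : (([] : List Int) ++ findB_block 0 1 time) = if time < 1 then [0] else [] := by
        unfold findB_block
        by_cases ht : time < 1
        · rw [if_pos ht, (max_eq_left (by omega) : max 0 (0 + time) = 0)]
          decide
        · rw [if_neg ht, (max_eq_right (by omega) : max 0 (0 + time) = 0 + time),
            PySem.List.pyRange_one_eq_nil (by omega)]
          simp
      rw [hb]
      show findA_go time rest (0 + 1) ([] ++ [x])
          (if time < (([] ++ [x] : List Int).length : Int) then PySem.Set.add PySem.Set.empty 0
           else PySem.Set.empty) = _
      by_cases ht : time < 1
      · rw [if_pos (by simpa using ht), if_pos ht]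
        rfl
      · rw [if_neg (by simpa using ht), if_neg ht]
        rfl
    rw [first, go_eq time rest x 0 1 [x] []
      (by simp) (PySem.List.pyGetD_neg_one_append_singleton [] x 0) (by simp) (by simp)]
    rw [PySem.Set.ofList_eq_self_of_nodup]
    exact List.Pairwise.imp ne_of_lt
      (goB_sorted time rest x 0 1 [] (by omega) (by simp) (by simp))
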